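-- pv_equiv track=rewrite | github.com/k1rtsu/Tiralabra | src/algs/huffman.py | remove_one_of_consecutive_ones
-- ===== SOURCE A (Python) =====
-- def remove_one_of_consecutive_ones(data):
--     """
--     Removes redundant consecutive ones from the tree data to ensure that the deserialized Huffman tree
--     is identical to the original tree.
--     """
--     result = []
--     i = 0
--     while i < len(data):
--         if i < len(data) - 1 and data[i] == data[i + 1] == 1:
--             result.append(1)  # Keep one of the consecutive ones
--             i += 2  # Skip the next consecutive one
--         else:
--             result.append(data[i])  # Append the current bit
--             i += 1
--     return result
-- ===== SOURCE B (Python) =====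
-- def remove_one_of_consecutive_ones(data):
--     """Run-based rewrite: scan each maximal run of equal elements once;
--     a run of ones of length L becomes L//2 ones plus the run's last element
--     if L is odd; any other run is copied unchanged."""
--     result = []
--     i = 0
--     n = len(data)
--     while i < n:
--         j = i + 1
--         while j < n and data[j] == data[i]:
--             j += 1
--         if data[i] == 1:
--             L = j - i
--             result.extend([1] * (L // 2))
--             if L % 2:
--                 result.append(data[j - 1])
--         else:
--             result.extend(data[i:j])
--         i = j
--     return result
-- ===== Notes on version B (the rewrite author's own statement) =====
-- stated objective: alternative
-- what changed: Replaces A's element-by-element pair-skipping index loop with a run-based pass: group maximal runs of equal elements and emit L//2 ones (plus the run's last element when L is odd) for runs of ones, other runs unchanged.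
import Mathlib
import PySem

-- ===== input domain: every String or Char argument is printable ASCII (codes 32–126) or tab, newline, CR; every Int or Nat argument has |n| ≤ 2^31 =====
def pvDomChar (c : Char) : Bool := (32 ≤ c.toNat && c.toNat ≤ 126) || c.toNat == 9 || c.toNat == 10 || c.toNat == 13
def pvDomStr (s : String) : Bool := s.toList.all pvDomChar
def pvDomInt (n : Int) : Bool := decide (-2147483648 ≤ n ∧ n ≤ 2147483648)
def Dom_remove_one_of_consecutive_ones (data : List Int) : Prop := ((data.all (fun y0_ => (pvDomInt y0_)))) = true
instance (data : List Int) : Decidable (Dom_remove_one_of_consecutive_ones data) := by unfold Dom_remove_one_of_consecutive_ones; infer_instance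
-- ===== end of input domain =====

-- B rewrites A's pair-skipping index loop as a single run-based pass (group maximal runs of equal
-- elements, emit L/2 ones plus the run's last element when L is odd); alternative decomposition, same cost.

-- ===== PORT A =====
-- while-loop over indices transliterated as structural recursion over the list:
-- each step looks at data[i] (and data[i+1] when it exists) in the same branch order.
def remove_one_of_consecutive_ones (data : List Int) : List Int :=
  match data with
  | [] => []
  | [x] => [x]
  | x :: y :: rest =>
    if x = y ∧ y = 1 then 1 :: remove_one_of_consecutive_ones rest
    else x :: remove_one_of_consecutive_ones (y :: rest)

-- ===== PORT B =====
-- inner while 'j += 1 while data[j] == data[i]' of Source B: returns (run after data[i], remainder)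
def pvTakeRun (x : Int) : List Int → (List Int × List Int)
  | [] => ([], [])
  | y :: rest =>
    if y = x then
      let p := pvTakeRun x rest
      (y :: p.1, p.2)
    else ([], y :: rest)

theorem pvTakeRun_snd_le (x : Int) (l : List Int) : (pvTakeRun x l).2.length ≤ l.length := by
  induction l with
  | nil => simp [pvTakeRun]
  | cons y rest ih =>
    simp only [pvTakeRun]
    split
    · simp; omega
    · simp

-- outer while of Source B: run = data[i:j], L = j - i, data[j-1] = run.getLast!
def pvRunPass (data : List Int) : List Int :=
  match data with
  | [] => []
  | x :: rest =>
    let p := pvTakeRun x rest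
    let run := x :: p.1
    let L := run.length
    (if x = 1 then
       List.replicate (L / 2) 1 ++ (if L % 2 = 1 then [run.getLast!] else [])
     else run) ++ pvRunPass p.2
termination_by data.length
decreasing_by
  simp only [List.length_cons]
  exact Nat.lt_succ_of_le (pvTakeRun_snd_le x rest)

def remove_one_of_consecutive_ones_alt (data : List Int) : List Int := pvRunPass data

-- ===== PRECONDITION & SPEC =====
def Spec_remove_one_of_consecutive_ones (data : List Int) (out : List Int) : Prop := out = remove_one_of_consecutive_ones_alt data
instance (data : List Int) (out : List Int) : Decidable (Spec_remove_one_of_consecutive_ones data out) := by unfold Spec_remove_one_of_consecutive_ones; infer_instance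

-- ===== CLAIM (what is proved, stated in full; the proofs are below) =====
def Claim_equal_remove_one_of_consecutive_ones : Prop := ∀ (data : List Int), Dom_remove_one_of_consecutive_ones data → Spec_remove_one_of_consecutive_ones data (remove_one_of_consecutive_ones data)

-- ===== LEMMAS AND PROOFS =====

-- ===== VERDICT (by name: the statement is the Claim_ definition above) =====
-- run elements all equal x
theorem pvTakeRun_fst_eq (x : Int) (l : List Int) : ∀ a ∈ (pvTakeRun x l).1, a = x := by
  induction l with
  | nil => simp [pvTakeRun]
  | cons y rest ih =>
    simp only [pvTakeRun]
    split
    · rename_i h; intro a ha; rcases List.mem_cons.1 ha with h1|h1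
      · omega
      · exact ih a h1
    · simp

theorem pvTakeRun_append (x : Int) (l : List Int) :
    (pvTakeRun x l).1 ++ (pvTakeRun x l).2 = l := by
  induction l with
  | nil => simp [pvTakeRun]
  | cons y rest ih =>
    simp only [pvTakeRun]
    split <;> simp [ih]

theorem pvTakeRun_head (x : Int) (l : List Int) :
    ∀ t ∈ (pvTakeRun x l).2.head?, t ≠ x := by
  induction l with
  | nil => simp [pvTakeRun]
  | cons y rest ih =>
    simp only [pvTakeRun]
    split
    · exact ih
    · rename_i h; simp [h]

-- A passes an all-non-one block through unchanged
theorem A_skip (run tail : List Int) (h : ∀ a ∈ run, a ≠ 1) :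
    remove_one_of_consecutive_ones (run ++ tail) = run ++ remove_one_of_consecutive_ones tail := by
  induction run with
  | nil => rfl
  | cons a rest ih =>
    have ha : a ≠ 1 := h a (List.mem_cons_self ..)
    cases rest with
    | nil =>
      cases tail with
      | nil => rfl
      | cons t ts =>
        simp only [List.nil_append, List.cons_append, remove_one_of_consecutive_ones]
        rw [if_neg (by rintro ⟨h1, h2⟩; exact ha (h1.trans h2))]
    | cons b bs =>
      simp only [List.cons_append, remove_one_of_consecutive_ones]
      rw [if_neg (by rintro ⟨h1, h2⟩; exact ha (h1.trans h2))]
      have := ih (fun a h' => h a (List.mem_cons_of_mem _ h'))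
      simpa using this

-- A collapses a block of k ones followed by a non-one (or nothing)
theorem A_ones (k : Nat) (tail : List Int) (h : ∀ t ∈ tail.head?, t ≠ 1) :
    remove_one_of_consecutive_ones (List.replicate k 1 ++ tail) =
      List.replicate (k / 2) 1 ++ (if k % 2 = 1 then [(1 : Int)] else [])
        ++ remove_one_of_consecutive_ones tail := by
  induction k using Nat.strong_induction_on with
  | _ k ih =>
    match k with
    | 0 => simp
    | 1 =>
      cases tail with
      | nil => rfl
      | cons t ts =>
        have ht : t ≠ 1 := h t rfl
        simp only [List.replicate, List.nil_append, List.cons_append,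
          remove_one_of_consecutive_ones]
        rw [if_neg (by rintro ⟨h1, h2⟩; exact ht h2)]
        rfl
    | (k + 2) =>
      have h2 : List.replicate (k + 2) (1 : Int) ++ tail
          = 1 :: 1 :: (List.replicate k 1 ++ tail) := by
        simp [List.replicate_succ]
      rw [h2]
      simp only [remove_one_of_consecutive_ones]
      rw [if_pos ⟨trivial, trivial⟩]
      rw [ih k (by omega)]
      have hdiv : (k + 2) / 2 = k / 2 + 1 := by omega
      have hmod : (k + 2) % 2 = k % 2 := by omega
      rw [hdiv, hmod, List.replicate_succ]
      simp

theorem pvRunPass_eq (data : List Int) :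
    remove_one_of_consecutive_ones data = pvRunPass data := by
  induction data using pvRunPass.induct with
  | case1 => rw [pvRunPass]; rfl
  | case2 x rest p ih =>
    have hp : p = pvTakeRun x rest := rfl
    set run := x :: p.1 with hrunDef
    set L := run.length with hL
    have hsplit : x :: rest = run ++ p.2 := by
      rw [hrunDef, List.cons_append, hp, pvTakeRun_append]
    have hrun : ∀ a ∈ run, a = x := by
      intro a ha; rcases List.mem_cons.1 ha with h1|h1
      · exact h1
      · exact pvTakeRun_fst_eq x rest a h1
    rw [pvRunPass]
    simp only [← hp, ← hrunDef, ← hL]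
    by_cases hx : x = 1
    · have hrep : run = List.replicate L 1 := by
        apply List.eq_replicate_of_mem
        intro a ha; rw [hrun a ha, hx]
      have hone : ∀ m, (List.replicate (m + 1) (1 : Int)).getLast! = 1 := by
        intro m
        induction m with
        | zero => rfl
        | succ k ihm => rw [List.replicate_succ]; simp [List.getLast!]
      have hlast : run.getLast! = 1 := by
        rw [hrep]
        have hL : L = p.1.length + 1 := by rw [hL, hrunDef]; simp
        rw [hL]
        exact hone p.1.length
      rw [if_pos hx, hlast, hsplit, hrep]
      rw [A_ones L p.2 (by
        intro t ht
        have := pvTakeRun_head x rest t ht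
        rw [hx] at this; exact this)]
      rw [ih]
    · have hne : ∀ a ∈ run, a ≠ 1 := fun a ha => by rw [hrun a ha]; exact hx
      rw [if_neg hx, hsplit, A_skip run p.2 hne, ih]

theorem remove_one_of_consecutive_ones_spec : Claim_equal_remove_one_of_consecutive_ones := by
  intro data _
  unfold Spec_remove_one_of_consecutive_ones remove_one_of_consecutive_ones_alt
  exact pvRunPass_eq data
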